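-- pv_equiv track=rewrite | github.com/gabrielStanovsky/allennlp | allennlp/predictors/openie.py | join_mwp
-- ===== SOURCE A (Python) =====
-- from typing import List
--
-- def join_mwp(tags: List[str]):
--     """
--     Join multi-word predicates to a single
--     predicate ('V') token.
--     """
--     ret = []
--     verb_flag = False
--     for tag in tags:
--         if "V" in tag:
--             # Create a continuous 'V' BIO span
--             prefix, suffix = tag.split("-")
--
--             if verb_flag:
--                 # Continue a verb label across the different predicate parts
--                 prefix = 'I'
--
--             ret.append(f"{prefix}-V")
--             verb_flag = True
--         else:
--             ret.append(tag)
--             verb_flag = False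
--
--     return ret
-- ===== SOURCE B (Python) =====
-- from typing import List
--
-- def join_mwp(tags: List[str]):
--     """
--     Join multi-word predicates to a single
--     predicate ('V') token.
--
--     Run-based reformulation: split the tag sequence into maximal
--     consecutive runs of verb / non-verb tags; non-verb runs are kept
--     unchanged, a verb run becomes [prefix-V, I-V, I-V, ...].
--     """
--     ret = []
--     i, n = 0, len(tags)
--     while i < n:
--         isv = "V" in tags[i]
--         j = i + 1
--         while j < n and ("V" in tags[j]) == isv:
--             j += 1
--         run = tags[i:j]
--         if isv:
--             for k, tag in enumerate(run):
--                 prefix, suffix = tag.split("-")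
--                 ret.append(("I" if k else prefix) + "-V")
--         else:
--             ret.extend(run)
--         i = j
--     return ret
-- ===== Notes on version B (the rewrite author's own statement) =====
-- stated objective: alternative
-- what changed: Replaces A's single pass carrying a verb_flag boolean with a two-level run decomposition: the list is split into maximal consecutive runs of verb/non-verb tags, non-verb runs are copied unchanged and a verb run is rewritten positionally (first element keeps its BIO prefix, the rest become 'I-V').
import Mathlib
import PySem

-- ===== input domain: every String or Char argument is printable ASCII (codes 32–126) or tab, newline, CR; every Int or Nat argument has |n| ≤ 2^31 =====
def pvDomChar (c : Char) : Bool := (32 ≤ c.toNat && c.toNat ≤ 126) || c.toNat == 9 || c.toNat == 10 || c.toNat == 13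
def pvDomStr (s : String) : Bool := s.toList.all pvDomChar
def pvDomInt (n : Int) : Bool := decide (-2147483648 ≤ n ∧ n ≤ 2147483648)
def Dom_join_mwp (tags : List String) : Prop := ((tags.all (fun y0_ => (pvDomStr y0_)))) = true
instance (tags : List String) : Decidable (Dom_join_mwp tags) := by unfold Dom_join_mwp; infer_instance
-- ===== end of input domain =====

-- B replaces A's carried verb_flag single pass with an explicit two-level run decomposition
-- (maximal verb / non-verb runs, a verb run rewritten positionally); same cost, alternative structure.

-- shared primitive helpers: '"V" in tag' and the prefix of tag.split("-")
def hasV (tag : String) : Bool := PySem.Str.isIn "V" tag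

-- prefix of tag.split("-"); the '_ => ""' arm is where Python raises ValueError (outside Pre_)
def pfx (tag : String) : String :=
  match PySem.Str.split? tag "-" with
  | some [p, _] => p
  | _ => ""

-- ===== PORT A =====
-- A's for-loop over tags carrying the state (ret, verb_flag)
def joinLoopA : List String → List String → Bool → List String
  | [], ret, _ => ret
  | tag :: ts, ret, verb_flag =>
    if hasV tag then
      joinLoopA ts (ret ++ [(if verb_flag then "I" else pfx tag) ++ "-V"]) true
    else
      joinLoopA ts (ret ++ [tag]) false

def join_mwp (tags : List String) : List String := joinLoopA tags [] false

-- ===== PORT B =====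
-- the inner 'for k, tag in enumerate(run)' loop of B, carrying the index k
def emitRun : Nat → List String → List String
  | _, [] => []
  | k, tag :: ts => ((if k == 0 then pfx tag else "I") ++ "-V") :: emitRun (k + 1) ts

-- B's outer while loop over maximal runs: run = takeWhile (same verb-ness), rest = dropWhile
def join_mwp_alt : List String → List String
  | [] => []
  | t :: ts =>
    (if hasV t then emitRun 0 (t :: ts.takeWhile (fun x => hasV x == hasV t))
     else t :: ts.takeWhile (fun x => hasV x == hasV t)) ++
      join_mwp_alt (ts.dropWhile (fun x => hasV x == hasV t))
termination_by tags => tags.length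
decreasing_by
  simp only [List.length_cons]
  exact Nat.lt_succ_of_le (List.length_dropWhile_le _ _)

-- ===== PRECONDITION & SPEC =====
-- Pre_ excludes exactly the inputs where Python A raises ValueError: a tag containing "V"
-- whose split("-") does not have exactly two parts (B raises the same error there).
def Pre_join_mwp (tags : List String) : Prop :=
  ∀ tag ∈ tags, hasV tag = true → ((PySem.Str.split? tag "-").getD []).length = 2
instance (tags : List String) : Decidable (Pre_join_mwp tags) := by unfold Pre_join_mwp; infer_instance

def pvWitness_join_mwp : List String := ["B-V", "I-V", "O", "B-ARG0"]

def Spec_join_mwp (tags : List String) (out : List String) : Prop := out = join_mwp_alt tags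
instance (tags : List String) (out : List String) : Decidable (Spec_join_mwp tags out) := by unfold Spec_join_mwp; infer_instance

-- ===== CLAIM (what is proved, stated in full; the proofs are below) =====
def Claim_equal_join_mwp : Prop := ∀ (tags : List String), Dom_join_mwp tags → Pre_join_mwp tags → Spec_join_mwp tags (join_mwp tags)

-- ===== LEMMAS AND PROOFS =====

-- flag-carrying reformulation of A's loop without the accumulator
def goA : List String → Bool → List String
  | [], _ => []
  | tag :: ts, flag =>
    if hasV tag then ((if flag then "I" else pfx tag) ++ "-V") :: goA ts true
    else tag :: goA ts false

theorem joinLoopA_eq_goA (ts : List String) : ∀ ret flag, joinLoopA ts ret flag = ret ++ goA ts flag := by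
  induction ts with
  | nil => intro ret flag; simp [joinLoopA, goA]
  | cons t ts ih =>
    intro ret flag
    by_cases h : hasV t = true <;> simp [joinLoopA, goA, h, ih]

theorem emitRun_pos (ts : List String) : ∀ k, k ≠ 0 → emitRun k ts = List.replicate ts.length "I-V" := by
  induction ts with
  | nil => intro k _; simp [emitRun]
  | cons t ts ih =>
    intro k hk
    simp [emitRun, hk, ih (k + 1) (Nat.succ_ne_zero k), List.replicate_succ]

theorem alt_nil : join_mwp_alt [] = [] := by simp [join_mwp_alt]

theorem alt_cons (t : String) (ts : List String) :
    join_mwp_alt (t :: ts) =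
      (if hasV t then emitRun 0 (t :: ts.takeWhile (fun x => hasV x == hasV t))
       else t :: ts.takeWhile (fun x => hasV x == hasV t)) ++
        join_mwp_alt (ts.dropWhile (fun x => hasV x == hasV t)) := by
  rw [join_mwp_alt]

-- the key run lemma: A's flag loop, entered with 'flag', equals B's first-run decomposition
theorem goA_runs : ∀ n ts, List.length ts ≤ n → ∀ flag : Bool,
    goA ts flag =
      (match ts with
       | [] => []
       | t :: ts' =>
         (if hasV t then emitRun (if flag then 1 else 0) (t :: ts'.takeWhile (fun x => hasV x == hasV t))
          else t :: ts'.takeWhile (fun x => hasV x == hasV t)) ++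
           join_mwp_alt (ts'.dropWhile (fun x => hasV x == hasV t))) := by
  intro n
  induction n with
  | zero =>
    intro ts h flag
    have : ts = [] := List.eq_nil_of_length_eq_zero (Nat.le_zero.mp h)
    subst this; simp [goA]
  | succ n ih =>
    intro ts h flag
    match ts with
    | [] => simp [goA]
    | t :: ts' =>
      have hlen : List.length ts' ≤ n := by
        simpa [Nat.succ_le_succ_iff] using h
      by_cases hv : hasV t = true
      · -- verb head: goA emits and continues with flag = true
        have hrec := ih ts' hlen true
        simp only [goA, hv, if_pos]
        match ts' with
        | [] =>
          cases flag <;> simp [goA, emitRun, alt_nil]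
        | h' :: tl =>
          by_cases hv' : hasV h' = true
          · have htw : (h' :: tl).takeWhile (fun x => hasV x == true) =
                h' :: tl.takeWhile (fun x => hasV x == true) := by
              simp [hv']
            have hdw : (h' :: tl).dropWhile (fun x => hasV x == true) =
                tl.dropWhile (fun x => hasV x == true) := by
              simp [hv']
            rw [htw, hdw, hrec]
            simp only [hv', if_pos]
            cases flag <;>
              simp [emitRun, emitRun_pos _ 2 (by norm_num), emitRun_pos _ 3 (by norm_num)]
          · have hvf' : hasV h' = false := by simpa using hv'
            have htw : (h' :: tl).takeWhile (fun x => hasV x == true) = [] := by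
              simp [hvf']
            have hdw : (h' :: tl).dropWhile (fun x => hasV x == true) = h' :: tl := by
              simp [hvf']
            rw [htw, hdw, hrec]
            simp only [hvf']
            rw [alt_cons]
            cases flag <;> simp [hvf', emitRun]
      · -- non-verb head: tag kept, flag resets
        have hvf : hasV t = false := by simpa using hv
        have hrec := ih ts' hlen false
        simp only [goA, hvf, Bool.false_eq_true, if_neg, not_false_iff]
        match ts' with
        | [] => simp [goA, alt_nil]
        | h' :: tl =>
          by_cases hv' : hasV h' = true
          · have htw : (h' :: tl).takeWhile (fun x => hasV x == false) = [] := by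
              simp [hv']
            have hdw : (h' :: tl).dropWhile (fun x => hasV x == false) = h' :: tl := by
              simp [hv']
            rw [htw, hdw, hrec]
            simp only [hv', if_pos]
            rw [alt_cons]
            simp [hv']
          · have hvf' : hasV h' = false := by simpa using hv'
            have htw : (h' :: tl).takeWhile (fun x => hasV x == false) =
                h' :: tl.takeWhile (fun x => hasV x == false) := by
              simp [hvf']
            have hdw : (h' :: tl).dropWhile (fun x => hasV x == false) =
                tl.dropWhile (fun x => hasV x == false) := by
              simp [hvf']
            rw [htw, hdw, hrec]
            simp [hvf']

theorem goA_eq_alt (ts : List String) : goA ts false = join_mwp_alt ts := by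
  rw [goA_runs ts.length ts le_rfl false]
  match ts with
  | [] => simp [alt_nil]
  | t :: ts' => rw [alt_cons]; simp

-- ===== VERDICT (by name: the statement is the Claim_ definition above) =====
theorem join_mwp_spec : Claim_equal_join_mwp := by
  intro tags _ _
  unfold Spec_join_mwp join_mwp
  rw [joinLoopA_eq_goA, goA_eq_alt]
  simp
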